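-- pv_equiv track=rewrite | github.com/BluRosie/hg-engine | scripts/update_machine_moves.py | build_canonical_lookup
-- ===== SOURCE A (Python) =====
-- def canonical_items():
--     base_A = 10_000
--     for n in range(1, 93):  # TM001..TM092
--         yield ('TM', n, base_A + (n - 1))
--     for n in range(1, 9):   # HM01..HM08
--         yield ('HM', n, base_A + 92 + (n - 1))
--
--     base_ORAS = 20_000
--     yield ('HM', 7, base_ORAS + 0)    # HM07_ORAS index 100
--     yield ('TM', 0, base_ORAS + 1)    # TM00 index 101
--
--     base_B = 30_000
--     for n in range(93, 96):           # TM093..TM095 -> 102..104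
--         yield ('TM', n, base_B + (n - 93))
--
--     base_C = 31_000
--     for n in range(96, 101):          # TM096..TM100 -> 105..109
--         yield ('TM', n, base_C + (n - 96))
--
--     base_D = 40_000
--     for i, n in enumerate(range(100, 230)):  # TM100_SV..TM229 -> 110..239
--         yield ('TM', n, base_D + i)
--
--     base_E = 50_000
--     for n in range(0, 100):           # TR00..TR99 -> 240..339
--         yield ('TR', n, base_E + n)
--
-- def item_to_machine_move_index(sim_id):
--     ITEM_TM001 = 10_000
--     ITEM_HM08 = ITEM_TM001 + 92 + 8 - 1
--     ITEM_HM07_ORAS = 20_000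
--     ITEM_TM00 = 20_001
--     ITEM_TM093 = 30_000
--     ITEM_TM095 = ITEM_TM093 + (95 - 93)
--     ITEM_TM096 = 31_000
--     ITEM_TM100 = ITEM_TM096 + (100 - 96)
--     ITEM_TM100_SV = 40_000
--     ITEM_TM229 = ITEM_TM100_SV + (229 - 100)
--     ITEM_TR00 = 50_000
--     ITEM_TR99 = ITEM_TR00 + 99
--
--     x = sim_id
--     if ITEM_TM001 <= x <= ITEM_HM08:
--         return x - ITEM_TM001
--     if x == ITEM_HM07_ORAS:
--         return 100
--     if x == ITEM_TM00:
--         return 101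
--     if ITEM_TM093 <= x <= ITEM_TM095:
--         return (x - ITEM_TM093) + 102
--     if ITEM_TM096 <= x <= ITEM_TM100:
--         return (x - ITEM_TM096) + 105
--     if ITEM_TM100_SV <= x <= ITEM_TM229:
--         return (x - ITEM_TM100_SV) + 110
--     if ITEM_TR00 <= x <= ITEM_TR99:
--         return (x - ITEM_TR00) + 240
--     return None
--
-- def build_canonical_lookup(machine_moves):
--     out = []
--     for kind, number, sim_id in canonical_items():
--         idx = item_to_machine_move_index(sim_id)
--         if idx is None:
--             continue
--         if 0 <= idx < len(machine_moves):
--             out.append((kind, number, idx, machine_moves[idx]))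
--         else:
--             break
--     return out
-- ===== SOURCE B (Python) =====
-- def _label(i):
--     # kind/number of the i-th machine slot, by arithmetic on the position alone
--     if i < 92:
--         return ('TM', i + 1)
--     if i < 100:
--         return ('HM', i - 91)
--     if i == 100:
--         return ('HM', 7)
--     if i == 101:
--         return ('TM', 0)
--     if i < 105:
--         return ('TM', i - 102 + 93)
--     if i < 110:
--         return ('TM', i - 105 + 96)
--     if i < 240:
--         return ('TM', i - 110 + 100)
--     if i < 340:
--         return ('TR', i - 240)
--     return None
--
-- def build_canonical_lookup(machine_moves):
--     out = []
--     for i, mv in enumerate(machine_moves):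
--         lab = _label(i)
--         if lab is None:
--             break
--         out.append((lab[0], lab[1], i, mv))
--     return out
-- ===== Notes on version B (the rewrite author's own statement) =====
-- stated objective: alternative
-- what changed: Drops the canonical_items generator and the item_to_machine_move_index inverse-lookup entirely: B iterates over machine_moves and computes each slot's (kind, number) label directly from the position by arithmetic, stopping at position 340.
import Mathlib
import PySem

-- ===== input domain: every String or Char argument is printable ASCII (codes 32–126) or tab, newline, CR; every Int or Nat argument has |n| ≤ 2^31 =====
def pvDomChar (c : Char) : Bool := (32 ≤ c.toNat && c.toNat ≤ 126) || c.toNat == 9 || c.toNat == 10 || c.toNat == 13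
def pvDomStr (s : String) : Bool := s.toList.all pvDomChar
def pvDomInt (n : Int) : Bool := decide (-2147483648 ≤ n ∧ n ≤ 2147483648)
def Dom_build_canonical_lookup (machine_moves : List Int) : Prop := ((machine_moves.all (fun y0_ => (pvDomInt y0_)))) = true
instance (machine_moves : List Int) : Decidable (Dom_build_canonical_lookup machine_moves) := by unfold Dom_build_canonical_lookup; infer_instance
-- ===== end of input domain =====

-- B drops the canonical_items generator and the inverse-index helper: it walks
-- machine_moves and computes each slot's label from the position by arithmetic
-- (objective: alternative, same cost).

-- ===== PORT A =====
-- canonical_items(): the generator, materialised in yield order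
def canonical_items_list : List (String × Int × Int) :=
  (PySem.List.pyRange 1 93 1).map (fun n => ("TM", n, 10000 + (n - 1)))
  ++ (PySem.List.pyRange 1 9 1).map (fun n => ("HM", n, 10000 + 92 + (n - 1)))
  ++ [("HM", 7, 20000 + 0), ("TM", 0, 20000 + 1)]
  ++ (PySem.List.pyRange 93 96 1).map (fun n => ("TM", n, 30000 + (n - 93)))
  ++ (PySem.List.pyRange 96 101 1).map (fun n => ("TM", n, 31000 + (n - 96)))
  ++ (PySem.List.enumerate (PySem.List.pyRange 100 230 1)).map (fun p => ("TM", p.2, 40000 + p.1))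
  ++ (PySem.List.pyRange 0 100 1).map (fun n => ("TR", n, 50000 + n))

def item_to_machine_move_index (sim_id : Int) : Option Int :=
  let ITEM_TM001 : Int := 10000
  let ITEM_HM08 : Int := ITEM_TM001 + 92 + 8 - 1
  let ITEM_HM07_ORAS : Int := 20000
  let ITEM_TM00 : Int := 20001
  let ITEM_TM093 : Int := 30000
  let ITEM_TM095 : Int := ITEM_TM093 + (95 - 93)
  let ITEM_TM096 : Int := 31000
  let ITEM_TM100 : Int := ITEM_TM096 + (100 - 96)
  let ITEM_TM100_SV : Int := 40000
  let ITEM_TM229 : Int := ITEM_TM100_SV + (229 - 100)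
  let ITEM_TR00 : Int := 50000
  let ITEM_TR99 : Int := ITEM_TR00 + 99
  let x := sim_id
  if ITEM_TM001 ≤ x ∧ x ≤ ITEM_HM08 then some (x - ITEM_TM001)
  else if x = ITEM_HM07_ORAS then some 100
  else if x = ITEM_TM00 then some 101
  else if ITEM_TM093 ≤ x ∧ x ≤ ITEM_TM095 then some ((x - ITEM_TM093) + 102)
  else if ITEM_TM096 ≤ x ∧ x ≤ ITEM_TM100 then some ((x - ITEM_TM096) + 105)
  else if ITEM_TM100_SV ≤ x ∧ x ≤ ITEM_TM229 then some ((x - ITEM_TM100_SV) + 110)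
  else if ITEM_TR00 ≤ x ∧ x ≤ ITEM_TR99 then some ((x - ITEM_TR00) + 240)
  else none

-- the for-loop with `continue` and `break`; pyGetD is exact because it is only
-- read under the guard 0 ≤ idx < len(machine_moves)
def build_loopA (machine_moves : List Int) : List (String × Int × Int) → List (String × Int × Int × Int)
  | [] => []
  | (kind, number, sim_id) :: rest =>
    match item_to_machine_move_index sim_id with
    | none => build_loopA machine_moves rest
    | some idx =>
      if 0 ≤ idx ∧ idx < (machine_moves.length : Int) then
        (kind, number, idx, PySem.List.pyGetD machine_moves idx 0) :: build_loopA machine_moves rest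
      else []

def build_canonical_lookup (machine_moves : List Int) : List (String × Int × Int × Int) :=
  build_loopA machine_moves canonical_items_list

-- ===== PORT B =====
-- _label(i): the slot's (kind, number) by arithmetic on the position
def labelB (i : Nat) : Option (String × Int) :=
  if i < 92 then some ("TM", (i : Int) + 1)
  else if i < 100 then some ("HM", (i : Int) - 91)
  else if i = 100 then some ("HM", 7)
  else if i = 101 then some ("TM", 0)
  else if i < 105 then some ("TM", (i : Int) - 102 + 93)
  else if i < 110 then some ("TM", (i : Int) - 105 + 96)
  else if i < 240 then some ("TM", (i : Int) - 110 + 100)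
  else if i < 340 then some ("TR", (i : Int) - 240)
  else none

-- the enumerate loop with `break`: walk machine_moves carrying the position
def build_loopB : List Int → Nat → List (String × Int × Int × Int)
  | [], _ => []
  | mv :: rest, i =>
    match labelB i with
    | none => []
    | some (kind, number) => (kind, number, (i : Int), mv) :: build_loopB rest (i + 1)

def build_canonical_lookup_alt (machine_moves : List Int) : List (String × Int × Int × Int) :=
  build_loopB machine_moves 0

-- ===== PRECONDITION & SPEC =====
def Spec_build_canonical_lookup (machine_moves : List Int) (out : List (String × Int × Int × Int)) : Prop := out = build_canonical_lookup_alt machine_moves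
instance (machine_moves : List Int) (out : List (String × Int × Int × Int)) : Decidable (Spec_build_canonical_lookup machine_moves out) := by unfold Spec_build_canonical_lookup; infer_instance

-- ===== CLAIM (what is proved, stated in full; the proofs are below) =====
def Claim_equal_build_canonical_lookup : Prop := ∀ (machine_moves : List Int), Dom_build_canonical_lookup machine_moves → Spec_build_canonical_lookup machine_moves (build_canonical_lookup machine_moves)

-- ===== LEMMAS AND PROOFS =====

-- A's loop over a suffix whose sim_ids decode to the consecutive indices k, k+1, …
-- and whose labels agree with labelB equals B's loop on mm.drop k from counter k.
theorem build_loopA_eq_loopB (mm : List Int) :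
    ∀ (its : List (String × Int × Int)) (k : Nat),
      its.map (fun t => item_to_machine_move_index t.2.2)
        = (List.range' k its.length).map (fun j => some (Int.ofNat j)) →
      its.map (fun t => some (t.1, t.2.1)) = (List.range' k its.length).map labelB →
      labelB (k + its.length) = none →
      build_loopA mm its = build_loopB (mm.drop k) k := by
  intro its
  induction its with
  | nil =>
    intro k _ _ h3
    cases h : mm.drop k with
    | nil => simp [build_loopA, build_loopB, h]
    | cons x xs =>
      simp only [List.length_nil, Nat.add_zero] at h3
      simp [build_loopA, build_loopB, h3]
  | cons t ts ih =>
    obtain ⟨kind, number, sim_id⟩ := t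
    intro k h1 h2 h3
    simp only [List.map_cons, List.length_cons, List.range'_succ, List.cons.injEq] at h1 h2
    obtain ⟨hhd1, htl1⟩ := h1
    obtain ⟨hhd2, htl2⟩ := h2
    have h3' : labelB (k + 1 + ts.length) = none := by
      have : k + 1 + ts.length = k + (ts.length + 1) := by omega
      rw [this]; exact h3
    by_cases hk : k < mm.length
    · have hdrop : mm.drop k = mm[k] :: mm.drop (k + 1) := List.drop_eq_getElem_cons hk
      have hget : PySem.List.pyGetD mm (k : Int) 0 = mm[k] := by
        simp [PySem.List.pyGetD_natCast, List.getD_eq_getElem?_getD, hk]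
      simp only [build_loopA, hhd1, Int.ofNat_eq_natCast, hdrop, build_loopB, ← hhd2]
      rw [if_pos (by omega), hget, ih (k + 1) (by simpa using htl1) (by simpa using htl2) h3']
    · have hdrop : mm.drop k = [] := List.drop_eq_nil_of_le (by omega)
      simp only [build_loopA, hhd1, Int.ofNat_eq_natCast, hdrop, build_loopB]
      rw [if_neg]
      omega

-- the concrete facts about the 340 canonical items: the j-th item's sim_id
-- decodes to index j, its label is labelB j, and labelB 340 = none
set_option maxRecDepth 8192 in
theorem canonical_indices :
    canonical_items_list.map (fun t => item_to_machine_move_index t.2.2)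
      = (List.range' 0 canonical_items_list.length).map (fun j => some (Int.ofNat j)) := by
  decide

set_option maxRecDepth 8192 in
theorem canonical_end : labelB (0 + canonical_items_list.length) = none := by
  decide

set_option maxRecDepth 8192 in
theorem canonical_labels_eq :
    canonical_items_list.map (fun t => some (t.1, t.2.1))
      = (List.range' 0 canonical_items_list.length).map labelB := by
  decide

-- ===== VERDICT (by name: the statement is the Claim_ definition above) =====
theorem build_canonical_lookup_spec : Claim_equal_build_canonical_lookup := by
  intro mm _
  unfold Spec_build_canonical_lookup build_canonical_lookup build_canonical_lookup_alt
  rw [build_loopA_eq_loopB mm canonical_items_list 0 canonical_indices canonical_labels_eq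
    canonical_end]
  rfl
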